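-- pv_equiv track=rewrite | github.com/logicmoo/ARC_study | arc/util/dictutil.py | dict_popset
-- ===== SOURCE A (Python) =====
-- from typing import Any, TypeVar
--
-- _KeyT = TypeVar("_KeyT", bound=str | int | tuple[Any, ...])
--
-- def dict_popset(
--     base: dict[_KeyT, set[int | str]], dict_group: list[dict[_KeyT, int | str]]
-- ) -> dict[_KeyT, set[int | str]]:
--     if not base:
--         return {}
--     for inp in dict_group:
--         for key, val in inp.items():
--             if key not in base:
--                 continue
--             base[key].discard(val)
--             if not base[key]:
--                 base.pop(key)
--     return base
-- ===== SOURCE B (Python) =====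
-- def dict_popset(base, dict_group):
--     if not base:
--         return {}
--     removals = {}
--     for inp in dict_group:
--         for key, val in inp.items():
--             removals.setdefault(key, []).append(val)
--     for key in list(base.keys()):
--         vals = removals.get(key)
--         if vals is None:
--             continue
--         base[key].difference_update(vals)
--         if not base[key]:
--             del base[key]
--     return base
-- ===== Notes on version B (the rewrite author's own statement) =====
-- stated objective: alternative
-- what changed: A interleaves membership test, per-value discard and immediate pop in one scan over the group dicts; B first builds a removals index (key -> list of values) in one gathering pass and then rebuilds/prunes base in a single pass over its keys.
import Mathlib
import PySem

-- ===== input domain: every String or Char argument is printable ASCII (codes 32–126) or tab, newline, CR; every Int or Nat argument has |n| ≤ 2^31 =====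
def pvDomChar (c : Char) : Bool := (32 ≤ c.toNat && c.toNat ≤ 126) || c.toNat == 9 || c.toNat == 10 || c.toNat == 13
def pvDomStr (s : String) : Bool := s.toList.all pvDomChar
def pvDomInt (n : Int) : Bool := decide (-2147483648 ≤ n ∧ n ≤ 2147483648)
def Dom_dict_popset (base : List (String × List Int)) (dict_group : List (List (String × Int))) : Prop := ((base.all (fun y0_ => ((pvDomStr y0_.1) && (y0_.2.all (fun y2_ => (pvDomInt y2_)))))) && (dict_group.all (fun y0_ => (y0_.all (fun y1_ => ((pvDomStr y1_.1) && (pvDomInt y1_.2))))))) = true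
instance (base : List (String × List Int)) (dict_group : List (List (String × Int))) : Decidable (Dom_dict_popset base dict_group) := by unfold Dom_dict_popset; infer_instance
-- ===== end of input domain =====

-- B replaces A's single interleaved scan (test membership, discard one value, pop immediately) by a
-- gather-then-apply decomposition: one pass indexes all removals per key, a second pass prunes base.
-- A mutates `base` in place (Python); the equivalence proved here is about the RETURN value only.


-- ===== PORT A =====
-- 'if not base: return {}'; then for each dict of the group, for each (key, val):
-- skip absent keys, discard val from base[key], pop the key if its set became empty.
def dict_popset (base : List (String × List Int)) (dict_group : List (List (String × Int))) : List (String × List Int) :=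
  if base = [] then []
  else
    dict_group.foldl (fun b inp =>
      inp.foldl (fun b kv =>
        if b.any (fun p => p.1 == kv.1) then
          (b.map (fun p => if p.1 == kv.1 then (p.1, PySem.Set.discard p.2 kv.2) else p)).filter
            (fun p => !(p.1 == kv.1 && p.2.isEmpty))
        else b) b) base

-- ===== PORT B =====
-- pass 1: removals = {}; for inp in dict_group: for key, val in inp.items(): removals.setdefault(key, []).append(val)
-- pass 2: for key in list(base.keys()): vals = removals.get(key); skip if None;
--         base[key].difference_update(vals); delete the key if its set became empty.
def dict_popset_alt (base : List (String × List Int)) (dict_group : List (List (String × Int))) : List (String × List Int) :=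
  if base = [] then []
  else
    let removals : PySem.Dict String (List Int) :=
      dict_group.foldl (fun d inp =>
        inp.foldl (fun d kv => d.modify kv.1 [] (· ++ [kv.2])) d) PySem.Dict.empty
    base.filterMap (fun p =>
      match removals.get? p.1 with
      | none => some p
      | some vals =>
        let s := PySem.Set.diff p.2 vals
        if s.isEmpty then none else some (p.1, s))

-- ===== PRECONDITION & SPEC =====
def Spec_dict_popset (base : List (String × List Int)) (dict_group : List (List (String × Int))) (out : List (String × List Int)) : Prop := out = dict_popset_alt base dict_group
instance (base : List (String × List Int)) (dict_group : List (List (String × Int))) (out : List (String × List Int)) : Decidable (Spec_dict_popset base dict_group out) := by unfold Spec_dict_popset; infer_instance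

-- ===== CLAIM (what is proved, stated in full; the proofs are below) =====
def Claim_equal_dict_popset : Prop := ∀ (base : List (String × List Int)) (dict_group : List (List (String × Int))), Dom_dict_popset base dict_group → Spec_dict_popset base dict_group (dict_popset base dict_group)

-- ===== LEMMAS AND PROOFS =====

-- The common characterisation of both ports: for each entry (k, s) of base, remove from s every
-- value paired with k somewhere in kvs (= dict_group flattened), and drop the entry when the
-- result is empty AND k occurs at all in kvs (only then does either program test emptiness).
def pvG (kvs : List (String × Int)) (p : String × List Int) : Option (String × List Int) :=
  let s' := p.2.filter (fun v => !kvs.any (fun kv => kv.1 == p.1 && kv.2 == v))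
  if s'.isEmpty && kvs.any (fun kv => kv.1 == p.1) then none else some (p.1, s')

theorem pvG_cons_of_ne (kv : String × Int) (rest : List (String × Int)) (p : String × List Int)
    (hk : (kv.1 == p.1) = false) : pvG (kv :: rest) p = pvG rest p := by
  have hpred : ∀ v : Int, ((kv :: rest).any fun q => q.1 == p.1 && q.2 == v)
      = (rest.any fun q => q.1 == p.1 && q.2 == v) := by
    intro v; simp [List.any_cons, hk]
  have hkey : ((kv :: rest).any fun q => q.1 == p.1) = (rest.any fun q => q.1 == p.1) := by
    simp [List.any_cons, hk]
  simp only [pvG, hpred, hkey]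

theorem pvFoldA_eq (kvs : List (String × Int)) (b : List (String × List Int)) :
    kvs.foldl (fun b kv =>
        if b.any (fun p => p.1 == kv.1) then
          (b.map (fun p => if p.1 == kv.1 then (p.1, PySem.Set.discard p.2 kv.2) else p)).filter
            (fun p => !(p.1 == kv.1 && p.2.isEmpty))
        else b) b = b.filterMap (pvG kvs) := by
  induction kvs generalizing b with
  | nil => simp [pvG]
  | cons kv rest ih =>
    rw [List.foldl_cons, ih]
    by_cases hmem : b.any (fun p => p.1 == kv.1) = true
    · rw [if_pos hmem, List.filterMap_filter, List.filterMap_map]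
      apply List.filterMap_congr
      intro p _
      by_cases hpk : (p.1 == kv.1) = true
      · have hk' : (kv.1 == p.1) = true := by rw [BEq.comm]; exact hpk
        simp only [Function.comp_def, hpk, if_true, Bool.true_and, pvG, List.any_cons, hk',
          Bool.true_or, Bool.and_true]
        by_cases hemp : (PySem.Set.discard p.2 kv.2).isEmpty = true
        · -- the set became empty: both sides drop the entry
          have hall : ∀ v ∈ p.2, (v == kv.2) = true := by
            intro v hv
            have := List.filter_eq_nil_iff.mp (List.isEmpty_iff.mp hemp) v hv
            simpa using this
          have h1 : (p.2.filter (fun v =>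
              !((kv.2 == v) || rest.any (fun q => q.1 == p.1 && q.2 == v)))) = [] := by
            apply List.filter_eq_nil_iff.mpr
            intro v hv
            have h2 : (kv.2 == v) = true := by rw [BEq.comm]; exact hall v hv
            simp [h2]
          rw [h1]
          simp [hemp]
        · -- the set stayed non-empty at this step
          have hf : (PySem.Set.discard p.2 kv.2).filter
                (fun v => !(rest.any (fun q => q.1 == p.1 && q.2 == v)))
              = p.2.filter (fun v =>
                !((kv.2 == v) || rest.any (fun q => q.1 == p.1 && q.2 == v))) := by
            unfold PySem.Set.discard
            rw [List.filter_filter]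
            apply List.filter_congr
            intro v _
            have h2 : (kv.2 == v) = (v == kv.2) := BEq.comm
            simp only [Bool.not_or, h2]
            cases (v == kv.2) <;> cases rest.any (fun q => q.1 == p.1 && q.2 == v) <;> rfl
          rw [Bool.not_eq_true] at hemp
          simp only [hemp, Bool.not_false, if_true]
          by_cases hkey : rest.any (fun q => q.1 == p.1) = true
          · simp only [hkey, Bool.and_true, hf]
          · rw [Bool.not_eq_true] at hkey
            have hnone : ∀ v, rest.any (fun q => q.1 == p.1 && q.2 == v) = false := by
              intro v
              simp only [List.any_eq_false] at hkey ⊢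
              intro q hq
              simp only [Bool.and_eq_true, not_and]
              intro h
              exact absurd h (hkey q hq)
            have hid : (PySem.Set.discard p.2 kv.2).filter
                (fun v => !(rest.any (fun q => q.1 == p.1 && q.2 == v)))
                = PySem.Set.discard p.2 kv.2 := by
              apply List.filter_eq_self.mpr
              intro v _
              simp [hnone v]
            rw [← hf, hid]
            simp [hkey, hemp]
      · have hk : (kv.1 == p.1) = false := by rw [BEq.comm]; simpa using hpk
        simp only [Function.comp_def, hpk, Bool.false_eq_true, if_false, Bool.false_and,
          Bool.not_false, if_true]
        exact (pvG_cons_of_ne kv rest p hk).symm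
    · rw [if_neg hmem]
      apply List.filterMap_congr
      intro p hp
      rw [Bool.not_eq_true, List.any_eq_false] at hmem
      have hk : (kv.1 == p.1) = false := by
        rw [BEq.comm]
        simpa using hmem p hp
      exact (pvG_cons_of_ne kv rest p hk).symm
theorem pvA_char (base : List (String × List Int)) (dict_group : List (List (String × Int))) :
    dict_popset base dict_group
      = if base = [] then [] else base.filterMap (pvG dict_group.flatten) := by
  unfold dict_popset
  by_cases h : base = []
  · simp [h]
  · rw [if_neg h, if_neg h, ← List.foldl_flatten, pvFoldA_eq]

theorem pvRemovals_contains (kvs : List (String × Int)) (d : PySem.Dict String (List Int))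
    (k : String) :
    (kvs.foldl (fun d kv => d.modify kv.1 [] (· ++ [kv.2])) d).contains k
      = (d.contains k || kvs.any (fun kv => kv.1 == k)) := by
  induction kvs generalizing d with
  | nil => simp
  | cons kv rest ih =>
    rw [List.foldl_cons, ih, PySem.Dict.contains_modify]
    have hc : (k == kv.1) = (kv.1 == k) := BEq.comm
    cases h1 : d.contains k <;> cases h2 : kv.1 == k <;>
      simp [List.any_cons, hc, h2]

theorem pvB_char (base : List (String × List Int)) (dict_group : List (List (String × Int))) :
    dict_popset_alt base dict_group
      = if base = [] then [] else base.filterMap (pvG dict_group.flatten) := by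
  unfold dict_popset_alt
  by_cases h : base = []
  · simp [h]
  · rw [if_neg h, if_neg h]
    rw [← List.foldl_flatten]
    apply List.filterMap_congr
    intro p _
    set kvs := dict_group.flatten with hkvs
    set d := kvs.foldl (fun d kv => d.modify kv.1 [] (· ++ [kv.2])) PySem.Dict.empty with hd
    have hcontains : d.contains p.1 = kvs.any (fun kv => kv.1 == p.1) := by
      rw [hd, pvRemovals_contains, PySem.Dict.contains_empty, Bool.false_or]
    have hgetD : d.getD p.1 [] = (kvs.filter (fun q => q.1 == p.1)).map (·.2) := by
      rw [hd, PySem.Dict.getD_foldl_modify_append]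
      simp [PySem.Dict.getD_empty]
    cases hg : d.get? p.1 with
    | none =>
      have hc : kvs.any (fun kv => kv.1 == p.1) = false := by
        rw [← hcontains, PySem.Dict.contains_eq_isSome_get?, hg]; rfl
      have hnone : ∀ v, kvs.any (fun kv => kv.1 == p.1 && kv.2 == v) = false := by
        intro v
        simp only [List.any_eq_false] at hc ⊢
        intro q hq
        simp only [Bool.and_eq_true, not_and]
        intro hh
        exact absurd hh (hc q hq)
      have hfil : p.2.filter (fun v => !(kvs.any (fun kv => kv.1 == p.1 && kv.2 == v))) = p.2 := by
        apply List.filter_eq_self.mpr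
        intro v _
        simp [hnone v]
      simp [pvG, hfil, hc]
    | some vals =>
      have hc : kvs.any (fun kv => kv.1 == p.1) = true := by
        rw [← hcontains, PySem.Dict.contains_eq_isSome_get?, hg]; rfl
      have hvals : vals = (kvs.filter (fun q => q.1 == p.1)).map (·.2) := by
        rw [← hgetD, PySem.Dict.getD_eq_get?_getD, hg]; rfl
      have hdiff : PySem.Set.diff p.2 vals
          = p.2.filter (fun v => !(kvs.any (fun kv => kv.1 == p.1 && kv.2 == v))) := by
        unfold PySem.Set.diff
        apply List.filter_congr
        intro v _
        congr 1
        rw [Bool.eq_iff_iff, PySem.Set.contains_iff, hvals]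
        simp only [List.mem_map, List.mem_filter, List.any_eq_true, Bool.and_eq_true, beq_iff_eq]
        constructor
        · rintro ⟨q, ⟨hq, hq1⟩, hq2⟩
          exact ⟨q, hq, hq1, hq2⟩
        · rintro ⟨q, hq, hq1, hq2⟩
          exact ⟨q, ⟨hq, hq1⟩, hq2⟩
      simp only [pvG, hdiff, hc, Bool.and_true]

-- ===== VERDICT (by name: the statement is the Claim_ definition above) =====
theorem dict_popset_spec : Claim_equal_dict_popset := by
  intro base dict_group _
  unfold Spec_dict_popset
  rw [pvA_char, pvB_char]
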